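-- pv_equiv track=rewrite | github.com/Price47/advent-of-code | AOC_18/day_4/challenge.py | _group_guard_habits
-- ===== SOURCE A (Python) =====
-- from operator import itemgetter
-- from itertools import groupby
--
-- def _group_guard_habits(habits):
--     grouped_guard_habits = {}
--     for guard_number, habits in habits.items():
--         grouped_guard_habits[guard_number] = {}
--         sorted_guard_habits = sorted(habits, key=itemgetter('date'))
--         grouped = groupby(sorted_guard_habits, key=itemgetter('date'))
--         for date_key, items in grouped:
--             grouped_guard_habits[guard_number][date_key] = [item for item in items]
--
--     return grouped_guard_habits
-- ===== SOURCE B (Python) =====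
-- def _group_guard_habits(habits):
--     result = {}
--     for guard, items in habits.items():
--         by_date = {}
--         for item in items:
--             by_date.setdefault(item['date'], []).append(item)
--         result[guard] = {d: by_date[d] for d in sorted(by_date)}
--     return result
-- ===== Notes on version B (the rewrite author's own statement) =====
-- stated objective: idiomatic
-- what changed: replaces A's per-guard sort of the whole record list followed by itertools.groupby with a single setdefault/append pass that hash-groups records by date, then a dict comprehension over the sorted distinct date keys
import Mathlib
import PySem

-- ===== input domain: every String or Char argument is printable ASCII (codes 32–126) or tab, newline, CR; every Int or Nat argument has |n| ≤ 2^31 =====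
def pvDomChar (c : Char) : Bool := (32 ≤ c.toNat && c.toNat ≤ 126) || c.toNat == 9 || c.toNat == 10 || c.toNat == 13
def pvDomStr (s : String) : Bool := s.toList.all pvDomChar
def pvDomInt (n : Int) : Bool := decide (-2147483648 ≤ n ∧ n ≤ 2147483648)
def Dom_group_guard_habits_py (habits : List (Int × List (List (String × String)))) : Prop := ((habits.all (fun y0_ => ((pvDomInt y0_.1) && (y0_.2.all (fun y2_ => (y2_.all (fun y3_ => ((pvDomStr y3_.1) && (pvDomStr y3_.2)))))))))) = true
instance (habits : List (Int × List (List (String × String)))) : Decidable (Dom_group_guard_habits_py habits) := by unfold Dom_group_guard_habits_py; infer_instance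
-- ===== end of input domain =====

-- B replaces A's per-guard sort-all-records + itertools.groupby by one setdefault/append
-- grouping pass followed by a sort of the distinct date keys only (objective: idiomatic).

-- ===== PORT A =====
-- itemgetter('date') on a record dict; total via getD — Pre_ guarantees the key is present
def pvDateOf (r : List (String × String)) : String := (PySem.Dict.mk r).getD "date" ""

-- itertools.groupby(l, key=itemgetter('date')), each group materialised as a list
def pvGroupby : List (List (String × String)) → List (String × List (List (String × String)))
  | [] => []
  | x :: xs =>
    (pvDateOf x, x :: xs.takeWhile (fun y => pvDateOf y == pvDateOf x)) ::
      pvGroupby (xs.dropWhile (fun y => pvDateOf y == pvDateOf x))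
  termination_by l => l.length
  decreasing_by
    exact Nat.lt_succ_of_le (List.length_dropWhile_le _ _)

def group_guard_habits_py (habits : List (Int × List (List (String × String)))) : List (Int × List (String × List (List (String × String)))) :=
  (habits.foldl
    (fun acc p =>
      acc.insert p.1
        (((pvGroupby (PySem.List.sorted p.2 pvDateOf)).foldl
            (fun d q => d.insert q.1 q.2) PySem.Dict.empty).items))
    PySem.Dict.empty).items

-- ===== PORT B =====
def group_guard_habits_py_alt (habits : List (Int × List (List (String × String)))) : List (Int × List (String × List (List (String × String)))) :=
  (habits.foldl
    (fun acc p =>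
      let by_date := p.2.foldl (fun d item => d.modify (pvDateOf item) [] (· ++ [item])) PySem.Dict.empty
      acc.insert p.1
        (((PySem.List.sorted by_date.keys (fun d => d)).foldl
            (fun d k => d.insert k (by_date.getD k [])) PySem.Dict.empty).items))
    PySem.Dict.empty).items

-- ===== PRECONDITION & SPEC =====
-- Pre_ excludes inputs where some record lacks a 'date' key (Python A raises KeyError there)
-- or has duplicate keys, which a Python dict cannot represent (the association list's
-- first-match lookup would diverge from dict's last-wins merge).
def Pre_group_guard_habits_py (habits : List (Int × List (List (String × String)))) : Prop :=
  ∀ p ∈ habits, ∀ r ∈ p.2, (r.map Prod.fst).Nodup ∧ "date" ∈ r.map Prod.fst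
instance (habits : List (Int × List (List (String × String)))) : Decidable (Pre_group_guard_habits_py habits) := by unfold Pre_group_guard_habits_py; infer_instance

def pvWitness_group_guard_habits_py : (List (Int × List (List (String × String)))) :=
  [(1, [[("date", "b"), ("x", "y")], [("date", "a")], [("date", "b")]])]

def Spec_group_guard_habits_py (habits : List (Int × List (List (String × String)))) (out : List (Int × List (String × List (List (String × String))))) : Prop := out = group_guard_habits_py_alt habits
instance (habits : List (Int × List (List (String × String)))) (out : List (Int × List (String × List (List (String × String))))) : Decidable (Spec_group_guard_habits_py habits out) := by
  unfold Spec_group_guard_habits_py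
  exact @instDecidableEqList _ (@instDecidableEqProd _ _ Int.instDecidableEq
    (@instDecidableEqList _ (@instDecidableEqProd _ _ instDecidableEqString
      (@instDecidableEqList _ (@instDecidableEqList _ (@instDecidableEqProd _ _ instDecidableEqString instDecidableEqString)))))) _ _

-- ===== CLAIM (what is proved, stated in full; the proofs are below) =====
def Claim_equal_group_guard_habits_py : Prop := ∀ (habits : List (Int × List (List (String × String)))), Dom_group_guard_habits_py habits → Pre_group_guard_habits_py habits → Spec_group_guard_habits_py habits (group_guard_habits_py habits)

-- ===== LEMMAS AND PROOFS =====

theorem pv_flatMap_congr {α β : Type} {l : List α} {f g : α → List β}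
    (h : ∀ a ∈ l, f a = g a) : l.flatMap f = l.flatMap g := by
  induction l with
  | nil => rfl
  | cons a l ih =>
      simp only [List.flatMap_cons, h a List.mem_cons_self,
        ih (fun b hb => h b (List.mem_cons_of_mem _ hb))]

theorem pv_insertBy_append {α : Type} (bef : α → α → Bool) (x : α) (l r : List α)
    (h : ∀ y ∈ l, bef x y = false) :
    PySem.List.insertBy bef x (l ++ r) = l ++ PySem.List.insertBy bef x r := by
  induction l with
  | nil => simp
  | cons y l ih =>
      have hy : bef x y = false := h y (List.mem_cons_self)
      simp [PySem.List.insertBy, hy, ih (fun z hz => h z (List.mem_cons_of_mem _ hz))]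

theorem pv_pairwise_lt_orderedInsert (a : String) (D : List String)
    (hD : D.Pairwise (· < ·)) (hnm : a ∉ D) :
    (List.orderedInsert (· ≤ ·) a D).Pairwise (· < ·) := by
  have h1 : (List.orderedInsert (· ≤ ·) a D).Pairwise (· ≤ ·) :=
    List.Pairwise.orderedInsert a D (hD.imp le_of_lt)
  have h2 : (List.orderedInsert (· ≤ ·) a D).Nodup :=
    (List.perm_orderedInsert _ a D).nodup_iff.mpr (List.nodup_cons.mpr ⟨hnm, hD.imp ne_of_lt⟩)
  exact (h1.and h2).imp (fun h => lt_of_le_of_ne h.1 h.2)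

theorem pv_insertBy_flatMap (D : List String) (c : String → List (List (String × String)))
    (x : List (String × String))
    (hD : D.Pairwise (· < ·))
    (hkey : ∀ d ∈ D, ∀ y ∈ c d, pvDateOf y = d)
    (hne : ∀ d ∈ D, c d ≠ [])
    (hnew : pvDateOf x ∉ D → c (pvDateOf x) = []) :
    PySem.List.insertBy (fun a b => decide (pvDateOf a < pvDateOf b)) x (D.flatMap c)
      = (if pvDateOf x ∈ D then D else List.orderedInsert (· ≤ ·) (pvDateOf x) D).flatMap
          (fun d => c d ++ if d = pvDateOf x then [x] else []) := by
  induction D with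
  | nil =>
      have hcx : c (pvDateOf x) = [] := hnew (by simp)
      simp [PySem.List.insertBy, List.orderedInsert, hcx]
  | cons d0 D' ih =>
      have hall : ∀ d ∈ D', d0 < d := (List.pairwise_cons.mp hD).1
      obtain ⟨y, t, hct⟩ : ∃ y t, c d0 = y :: t := by
        cases hcd : c d0 with
        | nil => exact absurd hcd (hne d0 List.mem_cons_self)
        | cons y t => exact ⟨y, t, rfl⟩
      have hkey0 : ∀ z ∈ c d0, pvDateOf z = d0 := hkey d0 List.mem_cons_self
      have hyd : pvDateOf y = d0 := hkey0 y (by rw [hct]; exact List.mem_cons_self)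
      rcases lt_trichotomy (pvDateOf x) d0 with hlt | heq | hgt
      · -- x goes strictly before the d0-chunk
        have hnm : pvDateOf x ∉ d0 :: D' := by
          intro hm
          rcases List.mem_cons.mp hm with h | h
          · exact absurd h (ne_of_lt hlt)
          · exact absurd (hall _ h) (not_lt.mpr (le_of_lt hlt))
        have hcx : c (pvDateOf x) = [] := hnew hnm
        have hbef : decide (pvDateOf x < pvDateOf y) = true := by rw [hyd]; exact decide_eq_true hlt
        have hoi : List.orderedInsert (· ≤ ·) (pvDateOf x) (d0 :: D') = pvDateOf x :: d0 :: D' := by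
          simp [List.orderedInsert, le_of_lt hlt]
        rw [if_neg hnm, hoi]
        simp only [List.flatMap_cons, hct, List.cons_append]
        rw [pv_flatMap_congr (l := D') (f := fun d => c d ++ if d = pvDateOf x then [x] else [])
          (g := c) (fun d hd => by
            have : d ≠ pvDateOf x := fun h => hnm (h ▸ List.mem_cons_of_mem _ hd)
            simp [this])]
        have hd0x : d0 ≠ pvDateOf x := fun h => hnm (h ▸ List.mem_cons_self)
        have hstep : ∀ (l : List (List (String × String))),
            PySem.List.insertBy (fun a b => decide (pvDateOf a < pvDateOf b)) x (y :: l)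
              = x :: y :: l := by
          intro l
          unfold PySem.List.insertBy
          rw [hbef]
          simp
        rw [hstep]
        simp [hcx, hd0x]
      · -- x joins the d0-chunk, at its end
        have hskip : ∀ z ∈ c d0, (fun a b => decide (pvDateOf a < pvDateOf b)) x z = false := by
          intro z hz
          show decide (pvDateOf x < pvDateOf z) = false
          rw [hkey0 z hz, heq]
          simp
        have hrest : PySem.List.insertBy (fun a b => decide (pvDateOf a < pvDateOf b)) x (D'.flatMap c)
            = x :: D'.flatMap c := by
          cases hr : D'.flatMap c with
          | nil => simp [PySem.List.insertBy]
          | cons z l =>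
              have hz : z ∈ D'.flatMap c := by rw [hr]; exact List.mem_cons_self
              obtain ⟨d, hd, hzc⟩ := List.mem_flatMap.mp hz
              have : pvDateOf x < pvDateOf z := by
                rw [hkey d (List.mem_cons_of_mem _ hd) z hzc, heq]; exact hall d hd
              simp [PySem.List.insertBy, this]
        rw [if_pos (heq ▸ List.mem_cons_self)]
        simp only [List.flatMap_cons]
        rw [pv_insertBy_append _ _ _ _ hskip, hrest]
        rw [pv_flatMap_congr (l := D') (f := fun d => c d ++ if d = pvDateOf x then [x] else [])
          (g := c) (fun d hd => by
            have : d ≠ pvDateOf x := fun h => absurd (hall d hd) (by rw [h, heq]; exact lt_irrefl _)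
            simp [this])]
        simp [heq]
      · -- x goes strictly after the d0-chunk
        have hskip : ∀ z ∈ c d0, (fun a b => decide (pvDateOf a < pvDateOf b)) x z = false := by
          intro z hz
          show decide (pvDateOf x < pvDateOf z) = false
          rw [hkey0 z hz]
          simp [not_lt.mpr (le_of_lt hgt)]
        have hd0x : d0 ≠ pvDateOf x := ne_of_lt hgt
        have hih := ih (List.pairwise_cons.mp hD).2
          (fun d hd => hkey d (List.mem_cons_of_mem _ hd))
          (fun d hd => hne d (List.mem_cons_of_mem _ hd))
          (fun h => hnew (by
            intro hm
            rcases List.mem_cons.mp hm with h' | h'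
            · exact hd0x h'.symm
            · exact h h'))
        simp only [List.flatMap_cons]
        rw [pv_insertBy_append _ _ _ _ hskip, hih]
        by_cases hmem : pvDateOf x ∈ D'
        · rw [if_pos hmem, if_pos (List.mem_cons_of_mem _ hmem)]
          simp only [List.flatMap_cons, if_neg hd0x, List.append_nil]
        · rw [if_neg hmem, if_neg (by
            intro hm
            rcases List.mem_cons.mp hm with h' | h'
            · exact hd0x h'.symm
            · exact hmem h')]
          have hoi : List.orderedInsert (· ≤ ·) (pvDateOf x) (d0 :: D')
              = d0 :: List.orderedInsert (· ≤ ·) (pvDateOf x) D' := by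
            simp [List.orderedInsert, not_le.mpr hgt]
          rw [hoi]
          simp only [List.flatMap_cons, if_neg hd0x, List.append_nil]

def pvChunk (hs : List (List (String × String))) (d : String) : List (List (String × String)) :=
  hs.filter (fun r => pvDateOf r == d)
def pvDates (hs : List (List (String × String))) : List String :=
  PySem.List.sorted (PySem.Set.ofList (hs.map pvDateOf)) (fun x => x)

theorem pv_dates_pairwise (hs : List (List (String × String))) :
    (pvDates hs).Pairwise (· < ·) :=
  PySem.List.sorted_ofList_pairwise_lt _

theorem pv_mem_dates (hs : List (List (String × String))) (d : String) :
    d ∈ pvDates hs ↔ d ∈ hs.map pvDateOf := by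
  unfold pvDates
  rw [PySem.List.mem_sorted, PySem.Set.mem_ofList]

theorem pv_chunk_key (hs : List (List (String × String))) (d : String) :
    ∀ y ∈ pvChunk hs d, pvDateOf y = d := by
  intro y hy
  have := List.of_mem_filter hy
  simpa using this

theorem pv_chunk_ne (hs : List (List (String × String))) (d : String) (hd : d ∈ pvDates hs) :
    pvChunk hs d ≠ [] := by
  rw [pv_mem_dates] at hd
  obtain ⟨r, hr, hrd⟩ := List.mem_map.mp hd
  intro h
  have : r ∈ pvChunk hs d := List.mem_filter.mpr ⟨hr, by simp [hrd]⟩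
  simp [h] at this

theorem pv_chunk_empty (hs : List (List (String × String))) (d : String) (hd : d ∉ pvDates hs) :
    pvChunk hs d = [] := by
  rw [pv_mem_dates] at hd
  rw [pvChunk, List.filter_eq_nil_iff]
  intro r hr
  simp only [beq_iff_eq]
  intro h
  exact hd (List.mem_map.mpr ⟨r, hr, h⟩)

theorem pv_sorted_eq_flatMap (hs : List (List (String × String))) :
    PySem.List.sorted hs pvDateOf = (pvDates hs).flatMap (pvChunk hs) := by
  induction hs using List.reverseRecOn with
  | nil => rfl
  | append_singleton hs x ih =>
      have hfold : PySem.List.sorted (hs ++ [x]) pvDateOf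
          = PySem.List.insertBy (fun a b => decide (pvDateOf a < pvDateOf b)) x
              (PySem.List.sorted hs pvDateOf) := by
        rw [PySem.List.sorted_eq_foldl_insertBy, PySem.List.sorted_eq_foldl_insertBy,
          List.foldl_append]
        rfl
      rw [hfold, ih,
        pv_insertBy_flatMap (pvDates hs) (pvChunk hs) x (pv_dates_pairwise hs)
          (fun d _ => pv_chunk_key hs d) (fun d hd => pv_chunk_ne hs d hd)
          (fun h => pv_chunk_empty hs _ h)]
      have hchunk : ∀ d, pvChunk (hs ++ [x]) d
          = pvChunk hs d ++ if d = pvDateOf x then [x] else [] := by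
        intro d
        unfold pvChunk
        rw [List.filter_append]
        congr 1
        by_cases h : pvDateOf x = d
        · subst h; simp
        · have h2 : d ≠ pvDateOf x := fun hh => h hh.symm
          have h3 : (pvDateOf x == d) = false := beq_false_of_ne h
          simp only [List.filter_cons, List.filter_nil, h3, if_neg h2]
          simp
      have hdates : pvDates (hs ++ [x])
          = if pvDateOf x ∈ pvDates hs then pvDates hs
            else List.orderedInsert (· ≤ ·) (pvDateOf x) (pvDates hs) := by
        by_cases hm : pvDateOf x ∈ hs.map pvDateOf
        · rw [if_pos ((pv_mem_dates hs _).mpr hm)]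
          unfold pvDates
          rw [List.map_append]
          simp only [List.map_cons, List.map_nil]
          rw [PySem.Set.ofList_append_singleton,
            PySem.Set.add_of_mem ((PySem.Set.mem_ofList _ _).mpr hm)]
        · rw [if_neg (fun h => hm ((pv_mem_dates hs _).mp h))]
          unfold pvDates
          rw [List.map_append]
          simp only [List.map_cons, List.map_nil]
          rw [PySem.Set.ofList_append_singleton,
            PySem.Set.add_of_not_mem (fun h => hm ((PySem.Set.mem_ofList _ _).mp h))]
          apply PySem.List.sorted_eq_of_perm_of_pairwise_lt
          · exact (List.perm_orderedInsert _ _ _).trans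
              ((List.Perm.cons _ (PySem.List.sorted_perm _ _ _)).trans
                (List.perm_append_singleton _ _).symm)
          · exact pv_pairwise_lt_orderedInsert _ _ (pv_dates_pairwise hs)
              (fun h => hm ((pv_mem_dates hs _).mp h))
      rw [hdates]
      exact (pv_flatMap_congr (fun d _ => (hchunk d).symm))


theorem pv_groupby_flatMap (D : List String) (c : String → List (List (String × String)))
    (hD : D.Pairwise (· < ·))
    (hkey : ∀ d ∈ D, ∀ y ∈ c d, pvDateOf y = d)
    (hne : ∀ d ∈ D, c d ≠ []) :
    pvGroupby (D.flatMap c) = D.map (fun d => (d, c d)) := by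
  induction D with
  | nil => simp [pvGroupby]
  | cons d0 D' ih =>
      have hall : ∀ d ∈ D', d0 < d := (List.pairwise_cons.mp hD).1
      obtain ⟨y, t, hct⟩ : ∃ y t, c d0 = y :: t := by
        cases hcd : c d0 with
        | nil => exact absurd hcd (hne d0 List.mem_cons_self)
        | cons y t => exact ⟨y, t, rfl⟩
      have hkey0 : ∀ z ∈ c d0, pvDateOf z = d0 := hkey d0 List.mem_cons_self
      have hyd : pvDateOf y = d0 := hkey0 y (by rw [hct]; exact List.mem_cons_self)
      have htk : ∀ z ∈ t, (pvDateOf z == pvDateOf y) = true := by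
        intro z hz
        rw [hkey0 z (by rw [hct]; exact List.mem_cons_of_mem _ hz), hyd]
        simp
      have hrest : ∀ z ∈ D'.flatMap c, (pvDateOf z == pvDateOf y) = false := by
        intro z hz
        obtain ⟨d, hd, hzc⟩ := List.mem_flatMap.mp hz
        rw [hkey d (List.mem_cons_of_mem _ hd) z hzc, hyd]
        exact beq_false_of_ne (ne_of_gt (hall d hd))
      have htw : List.takeWhile (fun z => pvDateOf z == pvDateOf y) (t ++ D'.flatMap c) = t := by
        rw [List.takeWhile_append, if_pos (by rw [List.takeWhile_eq_self_iff.mpr htk])]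
        have hnil : List.takeWhile (fun z => pvDateOf z == pvDateOf y) (D'.flatMap c) = [] := by
          cases hr : D'.flatMap c with
          | nil => rfl
          | cons z l =>
              rw [List.takeWhile_cons_of_neg (by
                simp only [hrest z (by rw [hr]; exact List.mem_cons_self)]; simp)]
        rw [hnil, List.append_nil]
      have hdw : List.dropWhile (fun z => pvDateOf z == pvDateOf y) (t ++ D'.flatMap c)
          = D'.flatMap c := by
        rw [List.dropWhile_append]
        have : List.dropWhile (fun z => pvDateOf z == pvDateOf y) t = [] := by
          rw [List.dropWhile_eq_nil_iff]
          intro z hz; exact htk z hz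
        rw [this]
        simp only [List.isEmpty_nil, if_true]
        cases hr : D'.flatMap c with
        | nil => rfl
        | cons z l =>
            rw [List.dropWhile_cons_of_neg (by
              simp only [hrest z (by rw [hr]; exact List.mem_cons_self)]; simp)]
      rw [List.flatMap_cons, hct, List.cons_append, pvGroupby, htw, hdw,
        ih (List.pairwise_cons.mp hD).2 (fun d hd => hkey d (List.mem_cons_of_mem _ hd))
          (fun d hd => hne d (List.mem_cons_of_mem _ hd)),
        List.map_cons, hyd, hct]

theorem pv_dates_nodup (hs : List (List (String × String))) : (pvDates hs).Nodup :=
  (pv_dates_pairwise hs).imp ne_of_lt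

theorem pv_A_items (hs : List (List (String × String))) :
    ((pvGroupby (PySem.List.sorted hs pvDateOf)).foldl
        (fun d q => d.insert q.1 q.2) PySem.Dict.empty).items
      = (pvDates hs).map (fun d => (d, pvChunk hs d)) := by
  rw [pv_sorted_eq_flatMap hs,
    pv_groupby_flatMap (pvDates hs) (pvChunk hs) (pv_dates_pairwise hs)
      (fun d _ => pv_chunk_key hs d) (fun d hd => pv_chunk_ne hs d hd)]
  rw [PySem.Dict.items_foldl_insert_fresh _ Prod.fst Prod.snd PySem.Dict.empty
    (fun a _ => PySem.Dict.contains_empty _)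
    (by
      rw [List.map_map]
      have : (Prod.fst ∘ fun d => (d, pvChunk hs d)) = id := rfl
      rw [this, List.map_id]
      exact pv_dates_nodup hs)]
  simp only [Prod.mk.eta, List.map_id_fun', id]
  show [] ++ _ = _
  rw [List.nil_append]

theorem pv_B_getD (hs : List (List (String × String))) (k : String) :
    (hs.foldl (fun d item => d.modify (pvDateOf item) [] (· ++ [item])) PySem.Dict.empty).getD k []
      = pvChunk hs k := by
  have hmap : hs.foldl (fun d item => d.modify (pvDateOf item) [] (· ++ [item])) PySem.Dict.empty
      = (hs.map (fun r => (pvDateOf r, r))).foldl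
          (fun d p => d.modify p.1 [] (· ++ [p.2])) PySem.Dict.empty := by
    rw [List.foldl_map]
  rw [hmap, PySem.Dict.getD_foldl_modify_append]
  simp [pvChunk, List.filter_map, List.map_map, Function.comp_def]

theorem pv_B_keys (hs : List (List (String × String))) :
    (hs.foldl (fun d item => d.modify (pvDateOf item) [] (· ++ [item])) PySem.Dict.empty).keys
      = PySem.Set.ofList (hs.map pvDateOf) := by
  rw [PySem.Dict.keys_foldl_modify_key hs pvDateOf [] (fun _ item => (· ++ [item]))]
  simp only [PySem.Dict.keys_empty]
  exact PySem.Set.update_nil_left _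

theorem pv_inner_eq (hs : List (List (String × String))) :
    ((pvGroupby (PySem.List.sorted hs pvDateOf)).foldl
        (fun d q => d.insert q.1 q.2) PySem.Dict.empty).items
      = (((PySem.List.sorted
            (hs.foldl (fun d item => d.modify (pvDateOf item) [] (· ++ [item])) PySem.Dict.empty).keys
            (fun d => d)).foldl
          (fun d k => d.insert k
            ((hs.foldl (fun d item => d.modify (pvDateOf item) [] (· ++ [item])) PySem.Dict.empty).getD k []))
          PySem.Dict.empty).items) := by
  rw [pv_A_items, pv_B_keys]
  generalize hbd : (hs.foldl (fun d item => d.modify (pvDateOf item) [] (· ++ [item])) PySem.Dict.empty) = bd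
  rw [PySem.Dict.items_foldl_insert_fresh _ (fun k => k) (fun k => bd.getD k [])
    PySem.Dict.empty
    (fun a _ => PySem.Dict.contains_empty _)
    (by
      rw [List.map_id']
      exact pv_dates_nodup hs)]
  show [] ++ _ = _
  rw [List.nil_append]
  symm
  apply List.map_congr_left
  intro d _
  rw [← hbd, pv_B_getD]

-- ===== VERDICT (by name: the statement is the Claim_ definition above) =====
theorem group_guard_habits_py_spec : Claim_equal_group_guard_habits_py := by
  intro habits _ _
  unfold Spec_group_guard_habits_py group_guard_habits_py group_guard_habits_py_alt
  congr 1
  apply PySem.List.foldl_congr_mem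
  intro acc p _
  simp only []
  rw [pv_inner_eq p.2]
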